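-- pv_equiv track=rewrite | github.com/MahiroWatanabe/kyopro_90_Python | submissions/52.py | make_bit
-- ===== SOURCE A (Python) =====
-- def make_bit(A):
--     B = []
--     for i in range(2**len(A)):
--         sum = 0
--         for j in range(len(A)):
--             if (i >> j) & 1:
--                 sum += A[j]
--         B.append(sum)
--
--     return B
-- ===== SOURCE B (Python) =====
-- def make_bit(A):
--     # Doubling DP: each element doubles the table, adding itself to the copy.
--     B = [0]
--     for a in A:
--         B += [x + a for x in B]
--     return B
-- ===== Notes on version B (the rewrite author's own statement) =====
-- stated objective: faster
-- what changed: Replaces the O(2^n * n) per-mask bit-scan with a doubling DP that extends the table once per element (O(2^n) total); intended as faster, measured 5-19x at n=16, the largest size both finish (the output itself has 2^n entries, so neither finishes at n=64).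
import Mathlib
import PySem

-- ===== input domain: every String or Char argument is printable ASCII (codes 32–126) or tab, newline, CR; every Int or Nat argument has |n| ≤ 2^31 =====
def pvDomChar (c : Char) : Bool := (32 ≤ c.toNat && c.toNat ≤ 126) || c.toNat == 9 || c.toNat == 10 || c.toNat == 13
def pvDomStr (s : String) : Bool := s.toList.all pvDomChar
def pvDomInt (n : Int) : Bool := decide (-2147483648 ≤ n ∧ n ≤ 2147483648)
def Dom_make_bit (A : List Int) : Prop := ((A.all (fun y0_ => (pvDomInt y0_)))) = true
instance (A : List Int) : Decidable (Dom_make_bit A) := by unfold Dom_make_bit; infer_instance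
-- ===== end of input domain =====

-- B replaces A's per-mask bit-scan by a doubling DP over the elements (intended as faster; timing run measured 5-19x at n=16, the largest size both finish).

-- ===== PORT A =====
-- inner loop: 'sum = 0; for j in range(len(A)): if (i >> j) & 1: sum += A[j]'
-- (j ≥ 0 always, so 'j.toNat' is exact; A[j] is always in range, ported as pyGetD)
def make_bit_inner (A : List Int) (i : Int) : Int :=
  (PySem.List.pyRange 0 (A.length : Int) 1).foldl
    (fun sum j =>
      if PySem.Int.band (i >>> j.toNat) 1 = 1 then sum + PySem.List.pyGetD A j 0 else sum) 0

def make_bit (A : List Int) : List Int :=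
  (PySem.List.pyRange 0 ((2 : Int) ^ A.length) 1).foldl
    (fun B i => B ++ [make_bit_inner A i]) []

-- ===== PORT B =====
-- 'B = [0]; for a in A: B += [x + a for x in B]'
def make_bit_alt (A : List Int) : List Int :=
  A.foldl (fun B a => B ++ B.map (fun x => x + a)) [0]

-- ===== PRECONDITION & SPEC =====
def Spec_make_bit (A : List Int) (out : List Int) : Prop := out = make_bit_alt A
instance (A : List Int) (out : List Int) : Decidable (Spec_make_bit A out) := by unfold Spec_make_bit; infer_instance

-- ===== CLAIM (what is proved, stated in full; the proofs are below) =====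
def Claim_equal_make_bit : Prop := ∀ (A : List Int), Dom_make_bit A → Spec_make_bit A (make_bit A)

-- ===== LEMMAS AND PROOFS =====

/-- The subset sum selected by the low bits of `i`: the common characterisation. -/
def pvBitsum : List Int → Nat → Int
  | [], _ => 0
  | a :: as, i => (if i % 2 = 1 then a else 0) + pvBitsum as (i / 2)

lemma pv_band_one (m : Nat) : PySem.Int.band (m : Int) 1 = ((m % 2 : Nat) : Int) := by
  rw [show (1 : Int) = ((1 : Nat) : Int) from rfl, PySem.Int.band_natCast, Nat.and_one_is_mod]

lemma pv_foldl_bits (A : List Int) : ∀ (k : Nat) (init : Int),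
    (List.range A.length).foldl
      (fun s j => if (k >>> j) % 2 = 1 then s + A.getD j 0 else s) init
    = init + pvBitsum A k := by
  induction A with
  | nil => intro k init; simp [pvBitsum]
  | cons a as ih =>
    intro k init
    rw [show (a :: as).length = as.length + 1 from rfl, List.range_succ_eq_map,
      List.foldl_cons, List.foldl_map]
    have h0 : (fun s j => if (k >>> (Nat.succ j)) % 2 = 1 then s + (a :: as).getD (Nat.succ j) 0 else s)
        = (fun s j => if ((k / 2) >>> j) % 2 = 1 then s + as.getD j 0 else s) := by
      funext s j
      rw [Nat.succ_eq_add_one, Nat.shiftRight_succ_inside]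
      rfl
    rw [h0, ih (k / 2)]
    simp only [Nat.shiftRight_zero, List.getD_cons_zero, pvBitsum]
    split_ifs <;> ring

lemma pv_inner_eq (A : List Int) (k : Nat) : make_bit_inner A (k : Int) = pvBitsum A k := by
  unfold make_bit_inner
  rw [PySem.List.pyRange_zero_nat, List.foldl_map,
    show pvBitsum A k = 0 + pvBitsum A k by ring, ← pv_foldl_bits A k 0]
  congr 1
  funext s j
  have h1 : ((k : Int) >>> ((((j : Int)).toNat : Nat) : Int)) = ((k >>> j : Nat) : Int) := by simp
  rw [h1, pv_band_one, PySem.List.pyGetD_natCast]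
  by_cases hc : (k >>> j) % 2 = 1
  · rw [if_pos (show (((k >>> j) % 2 : Nat) : Int) = 1 by exact_mod_cast hc), if_pos hc]
  · rw [if_neg (show ¬ (((k >>> j) % 2 : Nat) : Int) = 1 by exact_mod_cast hc), if_neg hc]

lemma pv_A_char (A : List Int) :
    make_bit A = (List.range (2 ^ A.length)).map (fun i => pvBitsum A i) := by
  unfold make_bit
  rw [show ((2 : Int) ^ A.length) = (((2 ^ A.length : Nat)) : Int) by push_cast; ring,
    PySem.List.pyRange_zero_nat, PySem.List.foldl_append_singleton_eq_map,
    List.nil_append, List.map_map]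
  exact List.map_congr_left fun k _ => pv_inner_eq A k

lemma pv_bs_append (A : List Int) (a : Int) : ∀ i : Nat,
    pvBitsum (A ++ [a]) i = pvBitsum A i + (if (i >>> A.length) % 2 = 1 then a else 0) := by
  induction A with
  | nil => intro i; simp [pvBitsum]
  | cons x as ih =>
    intro i
    simp only [List.cons_append, pvBitsum, ih (i / 2), List.length_cons,
      Nat.shiftRight_succ_inside]
    ring

lemma pv_bs_highadd : ∀ (A : List Int) (m j : Nat), A.length ≤ m →
    pvBitsum A (2 ^ m + j) = pvBitsum A j := by
  intro A
  induction A with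
  | nil => intro m j _; rfl
  | cons x as ih =>
    intro m j hm
    obtain ⟨m', rfl⟩ : ∃ m', m = m' + 1 := ⟨m - 1, by simp at hm; omega⟩
    have h2 : (2 : Nat) ^ (m' + 1) = 2 * 2 ^ m' := by ring
    simp only [pvBitsum]
    have hmod : (2 ^ (m' + 1) + j) % 2 = j % 2 := by omega
    have hdiv : (2 ^ (m' + 1) + j) / 2 = 2 ^ m' + j / 2 := by omega
    rw [hmod, hdiv, ih m' (j / 2) (by simpa using hm)]

lemma pv_B_char (A : List Int) :
    make_bit_alt A = (List.range (2 ^ A.length)).map (fun i => pvBitsum A i) := by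
  induction A using List.reverseRecOn with
  | nil => rfl
  | append_singleton A a ih =>
    unfold make_bit_alt at ih ⊢
    rw [List.foldl_append, List.foldl_cons, List.foldl_nil, ih]
    have hlen : (A ++ [a]).length = A.length + 1 := by simp
    rw [hlen, pow_succ, Nat.mul_two, List.range_add]
    rw [List.map_append, List.map_map, List.map_map]
    congr 1
    · apply List.map_congr_left
      intro k hk
      rw [List.mem_range] at hk
      rw [pv_bs_append A a k, Nat.shiftRight_eq_div_pow, Nat.div_eq_of_lt hk]
      simp
    · apply List.map_congr_left
      intro k hk
      rw [List.mem_range] at hk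
      simp only [Function.comp]
      rw [pv_bs_append A a (2 ^ A.length + k), Nat.shiftRight_eq_div_pow]
      have h1 : (2 ^ A.length + k) / 2 ^ A.length = 1 := by
        rw [Nat.add_comm, Nat.add_div_right k (Nat.two_pow_pos _), Nat.div_eq_of_lt hk]
      rw [h1, pv_bs_highadd A A.length k (le_refl _)]
      simp

-- ===== VERDICT (by name: the statement is the Claim_ definition above) =====
theorem make_bit_spec : Claim_equal_make_bit := by
  intro A _
  unfold Spec_make_bit
  rw [pv_A_char, pv_B_char]
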